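-- pv_equiv track=rewrite | github.com/eOSContinuum/eOS-DeepContext | .scripts/render.py | strip_identity_block
-- ===== SOURCE A (Python) =====
-- def strip_identity_block(body: str) -> str:
--     """Strip the leading identity-block bullets from a node body.
--
--     The identity block is the bullet list between the YAML frontmatter and
--     the H1 -- bullets like `- conforms_to::[[X]]`, `- in_practice_domain::[[Y]]`,
--     etc. Reader-facing forms (notably Touch Point) opt to hide these from
--     the rendered output via `hide_identity_block: true` in their frontmatter,
--     so the page reads as orientation prose rather than as a technical
--     predicate dump.
--
--     Strip skips leading blank lines, then drops every consecutive bullet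
--     line (starting with `- ` or `* `) until a non-bullet, non-blank line is
--     reached. The H1 (and everything after) is preserved as-is.
--     """
--     lines = body.splitlines(keepends=True)
--     out: list[str] = []
--     in_block = False
--     block_done = False
--     for line in lines:
--         if block_done:
--             out.append(line)
--             continue
--         stripped = line.lstrip()
--         if not in_block:
--             if stripped == "" or stripped.startswith("\n"):
--                 # Leading blank line — preserve and keep looking
--                 out.append(line)
--                 continue
--             if stripped.startswith("- ") or stripped.startswith("* "):
--                 in_block = True
--                 # Drop the bullet line
--                 continue
--             # First non-blank, non-bullet line before any bullets — no
--             # identity block to strip; keep the line and stop looking.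
--             block_done = True
--             out.append(line)
--             continue
--         # Inside the block
--         if stripped == "" or stripped.startswith("\n"):
--             # Blank line ends the block
--             block_done = True
--             out.append(line)
--             continue
--         if stripped.startswith("- ") or stripped.startswith("* "):
--             # Continuation of the identity-block bullets — drop
--             continue
--         # Non-bullet, non-blank line ends the block
--         block_done = True
--         out.append(line)
--     return "".join(out)
-- ===== SOURCE B (Python) =====
-- def strip_identity_block(body: str) -> str:
--     """Index-phase version: skip leading blanks, then skip consecutive bullet
--     lines, then splice head blanks + remainder."""
--     lines = body.splitlines(keepends=True)
--     i = 0
--     while i < len(lines) and lines[i].lstrip() == "":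
--         i += 1
--     j = i
--     while j < len(lines) and lines[j].lstrip().startswith(("- ", "* ")):
--         j += 1
--     return "".join(lines[:i] + lines[j:])
-- ===== Notes on version B (the rewrite author's own statement) =====
-- stated objective: simpler
-- what changed: Replaced A's single pass with in_block/block_done boolean flags by two explicit index phases (count leading blank lines, then count consecutive bullet lines) and one splice lines[:i]+lines[j:], dropping A's dead second blank test.
import Mathlib
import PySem

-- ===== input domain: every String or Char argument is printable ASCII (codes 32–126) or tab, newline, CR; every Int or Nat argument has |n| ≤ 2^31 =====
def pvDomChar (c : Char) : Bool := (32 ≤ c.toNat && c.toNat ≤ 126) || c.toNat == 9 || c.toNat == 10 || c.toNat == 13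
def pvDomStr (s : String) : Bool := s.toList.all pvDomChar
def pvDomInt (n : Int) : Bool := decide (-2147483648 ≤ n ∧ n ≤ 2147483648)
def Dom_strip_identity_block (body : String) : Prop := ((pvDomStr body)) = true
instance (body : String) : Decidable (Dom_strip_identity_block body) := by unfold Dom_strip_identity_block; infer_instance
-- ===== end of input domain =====

-- B replaces A's flag-driven single pass (in_block/block_done) by two index phases
-- (skip leading blanks, then skip consecutive bullets) and a splice; objective: simpler.

-- shared helper: str.splitlines(keepends=True), exact on \n / \r / \r\n line ends
-- (the only line terminators inside the ASCII+tab/newline/CR domain)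
def pvSplitKeep : List Char → List Char → List (List Char)
  | [], acc => if acc = [] then [] else [acc.reverse]
  | '\r' :: '\n' :: rest, acc => (acc.reverse ++ ['\r', '\n']) :: pvSplitKeep rest []
  | '\r' :: rest, acc => (acc.reverse ++ ['\r']) :: pvSplitKeep rest []
  | '\n' :: rest, acc => (acc.reverse ++ ['\n']) :: pvSplitKeep rest []
  | c :: rest, acc => pvSplitKeep rest (c :: acc)
  termination_by s _ => s.length
  decreasing_by all_goals simp

-- ===== PORT A =====
-- A's loop: state (in_block, block_done); emits kept lines in order
def pvALoop : List (List Char) → Bool → Bool → List (List Char)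
  | [], _, _ => []
  | line :: rest, inb, done =>
    if done then line :: pvALoop rest inb done
    else
      let s := PySem.Chars.lstrip line
      if !inb then
        if s = [] || PySem.Chars.startswith s ['\n'] then line :: pvALoop rest inb done
        else if PySem.Chars.startswith s ['-', ' '] || PySem.Chars.startswith s ['*', ' '] then
          pvALoop rest true done
        else line :: pvALoop rest inb true
      else
        if s = [] || PySem.Chars.startswith s ['\n'] then line :: pvALoop rest inb true
        else if PySem.Chars.startswith s ['-', ' '] || PySem.Chars.startswith s ['*', ' '] then
          pvALoop rest inb done
        else line :: pvALoop rest inb true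

def strip_identity_block (body : String) : String :=
  String.mk (PySem.Chars.join [] (pvALoop (pvSplitKeep body.toList []) false false))

-- ===== PORT B =====
-- first while loop of Source B: number of leading blank lines
def pvBlanks : List (List Char) → Nat
  | [] => 0
  | l :: rest => if PySem.Chars.lstrip l = [] then pvBlanks rest + 1 else 0

-- second while loop of Source B: number of consecutive bullet lines
def pvBullets : List (List Char) → Nat
  | [] => 0
  | l :: rest =>
    if PySem.Chars.startswith (PySem.Chars.lstrip l) ['-', ' '] ||
       PySem.Chars.startswith (PySem.Chars.lstrip l) ['*', ' '] then pvBullets rest + 1 else 0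

def strip_identity_block_alt (body : String) : String :=
  let lines := pvSplitKeep body.toList []
  let i := pvBlanks lines
  let j := i + pvBullets (lines.drop i)
  String.mk (PySem.Chars.join [] (lines.take i ++ lines.drop j))

-- ===== PRECONDITION & SPEC =====
def Spec_strip_identity_block (body : String) (out : String) : Prop := out = strip_identity_block_alt body
instance (body : String) (out : String) : Decidable (Spec_strip_identity_block body out) := by unfold Spec_strip_identity_block; infer_instance

-- ===== CLAIM (what is proved, stated in full; the proofs are below) =====
def Claim_equal_strip_identity_block : Prop := ∀ (body : String), Dom_strip_identity_block body → Spec_strip_identity_block body (strip_identity_block body)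

-- ===== LEMMAS AND PROOFS =====

-- lstrip never yields a string starting with '\n' (A's second blank test is dead)
lemma pv_lstrip_not_nl (l : List Char) :
    PySem.Chars.startswith (PySem.Chars.lstrip l) ['\n'] = false := by
  induction l with
  | nil => rfl
  | cons c t ih =>
    by_cases h : PySem.Chars.isspace c = true
    · simpa [PySem.Chars.lstrip, List.dropWhile, h] using ih
    · have hc : c ≠ '\n' := by rintro rfl; exact h rfl
      simp [PySem.Chars.lstrip, List.dropWhile, h, PySem.Chars.startswith, List.isPrefixOf]
      exact fun hn => absurd hn.symm hc

lemma pv_blank_not_bullet {l : List Char} (h : PySem.Chars.lstrip l = []) :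
    (PySem.Chars.startswith (PySem.Chars.lstrip l) ['-', ' '] ||
     PySem.Chars.startswith (PySem.Chars.lstrip l) ['*', ' ']) = false := by
  rw [h]; rfl

lemma pv_aLoop_done (ls : List (List Char)) (b : Bool) : pvALoop ls b true = ls := by
  induction ls with
  | nil => rfl
  | cons l rest ih => simp [pvALoop, ih]

lemma pv_bullet_ne_nil {l : List Char}
    (hb : (PySem.Chars.startswith (PySem.Chars.lstrip l) ['-', ' '] ||
           PySem.Chars.startswith (PySem.Chars.lstrip l) ['*', ' ']) = true) :
    PySem.Chars.lstrip l ≠ [] := by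
  intro h; rw [pv_blank_not_bullet h] at hb; exact Bool.false_ne_true hb

lemma pv_aLoop_inblock (ls : List (List Char)) :
    pvALoop ls true false = ls.drop (pvBullets ls) := by
  induction ls with
  | nil => rfl
  | cons l rest ih =>
    by_cases hb : (PySem.Chars.startswith (PySem.Chars.lstrip l) ['-', ' '] ||
        PySem.Chars.startswith (PySem.Chars.lstrip l) ['*', ' ']) = true
    · simp [pvALoop, pvBullets, hb, pv_bullet_ne_nil hb, pv_lstrip_not_nl, ih]
    · by_cases hbl : PySem.Chars.lstrip l = []
      · simp [pvALoop, pvBullets, hbl, PySem.Chars.startswith, pv_aLoop_done]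
      · simp [pvALoop, pvBullets, hbl, hb, pv_lstrip_not_nl, pv_aLoop_done]

lemma pv_aLoop_start (ls : List (List Char)) :
    pvALoop ls false false =
      ls.take (pvBlanks ls) ++ ls.drop (pvBlanks ls + pvBullets (ls.drop (pvBlanks ls))) := by
  induction ls with
  | nil => rfl
  | cons l rest ih =>
    by_cases hbl : PySem.Chars.lstrip l = []
    · simp [pvALoop, pvBlanks, hbl, ih, List.take_succ_cons, List.drop_succ_cons,
        Nat.add_right_comm]
    · by_cases hb : (PySem.Chars.startswith (PySem.Chars.lstrip l) ['-', ' '] ||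
          PySem.Chars.startswith (PySem.Chars.lstrip l) ['*', ' ']) = true
      · simp [pvALoop, pvBlanks, pvBullets, hbl, hb, pv_lstrip_not_nl, pv_aLoop_inblock]
      · simp [pvALoop, pvBlanks, pvBullets, hbl, hb, pv_lstrip_not_nl, pv_aLoop_done]

-- ===== VERDICT (by name: the statement is the Claim_ definition above) =====
theorem strip_identity_block_spec : Claim_equal_strip_identity_block := by
  intro body _
  unfold Spec_strip_identity_block strip_identity_block strip_identity_block_alt
  rw [pv_aLoop_start]
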